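-- pv_equiv track=rewrite | github.com/AaronGWang/BioInformaticsSpecialization | Module 1/1.4/gibbs_sampler.py | score_motifs_with_hamming_distance
-- ===== SOURCE A (Python) =====
-- def score_motifs_with_hamming_distance(motifs) -> int:
--   '''
--   Scores a list of motifs based on the number of mismatches per column
--
--   Args:
--     motifs (list): list of motifs
--
--   Returns:
--     score (int): score of the motifs
--   '''
--   k = len(motifs[0])
--   score = 0
--
--   for i in range(k):
--     column = [motif[i] for motif in motifs]
--     mostCommon = max(set(column), key=column.count)
--     score += sum(1 for nucleotide in column if nucleotide != mostCommon)
--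
--   return score
-- ===== SOURCE B (Python) =====
-- def score_motifs_with_hamming_distance(motifs) -> int:
--   '''
--   Scores a list of motifs based on the number of mismatches per column
--
--   Args:
--     motifs (list): list of motifs
--
--   Returns:
--     score (int): score of the motifs
--   '''
--   k = len(motifs[0])
--   n = len(motifs)
--   keep = 0
--   for i in range(k):
--     column = sorted(motif[i] for motif in motifs)
--     best = 0
--     run = 0
--     prev = None
--     for c in column:
--       run = run + 1 if c == prev else 1
--       prev = c
--       if run > best:
--         best = run
--     keep += best
--   return n * k - keep
-- ===== Notes on version B (the rewrite author's own statement) =====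
-- stated objective: alternative
-- what changed: A finds each column's majority nucleotide by rescanning the column with max(set(column), key=column.count) and then counts mismatches; B sorts each column and finds the longest run of equal adjacent characters in one linear scan (sort-then-scan mode), accumulating kept characters and returning n*k - kept.
import Mathlib
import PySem

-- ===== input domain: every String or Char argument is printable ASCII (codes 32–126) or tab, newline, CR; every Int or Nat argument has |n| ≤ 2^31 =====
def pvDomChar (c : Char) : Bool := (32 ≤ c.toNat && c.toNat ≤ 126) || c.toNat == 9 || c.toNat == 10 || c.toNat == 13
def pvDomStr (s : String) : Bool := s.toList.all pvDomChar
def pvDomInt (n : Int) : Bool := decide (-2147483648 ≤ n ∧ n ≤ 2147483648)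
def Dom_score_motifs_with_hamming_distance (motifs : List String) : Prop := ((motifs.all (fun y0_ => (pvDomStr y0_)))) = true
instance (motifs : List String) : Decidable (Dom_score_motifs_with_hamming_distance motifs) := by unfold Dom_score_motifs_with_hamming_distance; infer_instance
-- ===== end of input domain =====

-- B replaces A's per-column mode search (max(set(column), key=column.count), rescanning the
-- column per distinct character) by sort-then-scan: sort each column and take the longest run
-- of equal adjacent characters, returning n*k minus the total kept characters (same value).


-- ===== PORT A =====
-- Python A raises IndexError on [] (motifs[0]) and when some motif is shorter than
-- motifs[0] (motif[i]); those inputs are outside Pre_ and the ports return defaults there.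
-- max(set(column), key=column.count): ties in the key are broken by set hash order in
-- Python, but the returned SCORE does not depend on which argmax is chosen.
def score_motifs_with_hamming_distance (motifs : List String) : Int :=
  match motifs with
  | [] => 0
  | m0 :: _ =>
    let k := m0.toList.length
    (List.range k).foldl
      (fun score i =>
        let column := motifs.map (fun m => m.toList.getD i ' ')
        let mostCommon := (PySem.List.max? (PySem.Set.ofList column) (fun c => column.count c)).getD ' '
        score + ((column.countP (fun c => decide (c ≠ mostCommon)) : Int)))
      0

-- ===== PORT B =====
-- one step of B's inner scan over a sorted column: state (best, run, prev)
def pvScanStep (st : Int × Int × Option Char) (c : Char) : Int × Int × Option Char :=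
  let run := if some c == st.2.2 then st.2.1 + 1 else 1
  let best := if run > st.1 then run else st.1
  (best, run, some c)

def score_motifs_with_hamming_distance_alt (motifs : List String) : Int :=
  match motifs with
  | [] => 0
  | m0 :: _ =>
    let k := m0.toList.length
    let n : Int := motifs.length
    let keep := (List.range k).foldl
      (fun keep i =>
        let column := PySem.List.sorted (motifs.map (fun m => m.toList.getD i ' ')) (fun c => c) false
        keep + (column.foldl pvScanStep (0, 0, none)).1)
      0
    n * (k : Int) - keep

-- ===== PRECONDITION & SPEC =====
-- Pre_ excludes exactly the inputs where Python A (and B) raise IndexError: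
-- the empty list, and lists containing a motif shorter than the first one.
def Pre_score_motifs_with_hamming_distance (motifs : List String) : Prop :=
  motifs ≠ [] ∧ ∀ m ∈ motifs, (motifs.headD "").toList.length ≤ m.toList.length
instance (motifs : List String) : Decidable (Pre_score_motifs_with_hamming_distance motifs) := by
  unfold Pre_score_motifs_with_hamming_distance; infer_instance
def pvWitness_score_motifs_with_hamming_distance : List String := ["ACGT", "ACGA", "TCGT"]

def Spec_score_motifs_with_hamming_distance (motifs : List String) (out : Int) : Prop := out = score_motifs_with_hamming_distance_alt motifs
instance (motifs : List String) (out : Int) : Decidable (Spec_score_motifs_with_hamming_distance motifs out) := by unfold Spec_score_motifs_with_hamming_distance; infer_instance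

-- ===== CLAIM (what is proved, stated in full; the proofs are below) =====
def Claim_equal_score_motifs_with_hamming_distance : Prop := ∀ (motifs : List String), Dom_score_motifs_with_hamming_distance motifs → Pre_score_motifs_with_hamming_distance motifs → Spec_score_motifs_with_hamming_distance motifs (score_motifs_with_hamming_distance motifs)

-- ===== LEMMAS AND PROOFS =====

-- the best-update 'if run > best then run else best' is a max
lemma ite_gt_eq_max (b r : Int) : (if r > b then r else b) = max b r := by
  rw [max_def]; split_ifs <;> omega

-- one scan step on a repeated character
lemma scan_step_same (b r : Int) (c : Char) :
    pvScanStep (b, r, some c) c = (max b (r + 1), r + 1, some c) := by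
  have hbeq : (some c == some c) = true := by simp
  simp only [pvScanStep, hbeq, if_true]
  rw [ite_gt_eq_max]

-- B's scan over a constant run: run grows, best records it
lemma scan_replicate (c : Char) : ∀ (j : Nat) (b r : Int),
    (List.replicate j c).foldl pvScanStep (b, r, some c)
      = (if j = 0 then b else max b (r + j), r + (j : Int), some c) := by
  intro j
  induction j with
  | zero => intro b r; simp
  | succ j ih =>
    intro b r
    rw [List.replicate_succ, List.foldl_cons, scan_step_same, ih]
    have hr : r + 1 + (j : Int) = r + ((j : Int) + 1) := by ring
    rcases Nat.eq_zero_or_pos j with hj | hj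
    · subst hj; simp
    · have hj0 : j ≠ 0 := by omega
      simp only [hj0, if_false, Nat.succ_ne_zero, Nat.cast_add, Nat.cast_one]
      rw [max_assoc, max_eq_right (by omega : r + 1 ≤ r + 1 + (j : Int)), hr]

-- after a character different from prev, the scan state is independent of run/prev
lemma scan_reset (b r : Int) (p h : Char) (t : List Char) (hne : h ≠ p) :
    (h :: t).foldl pvScanStep (b, r, some p) = (h :: t).foldl pvScanStep (b, 0, none) := by
  simp only [List.foldl_cons]
  have h1 : pvScanStep (b, r, some p) h = (if 1 > b then 1 else b, 1, some h) := by
    simp [pvScanStep, hne]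
  have h2 : pvScanStep (b, 0, none) h = (if 1 > b then 1 else b, 1, some h) := by
    simp [pvScanStep]
  rw [h1, h2]

-- a nondecreasing list starts with a block of copies of its head, none of them later
lemma sorted_head_decomp (c : Char) (t : List Char)
    (hs : List.Pairwise (· ≤ ·) (c :: t)) :
    ∃ j rest, t = List.replicate j c ++ rest ∧ c ∉ rest ∧ List.Pairwise (· ≤ ·) rest := by
  induction t with
  | nil => exact ⟨0, [], rfl, by simp, List.Pairwise.nil⟩
  | cons d t' ih =>
    rcases List.pairwise_cons.mp hs with ⟨hcle, hdt⟩
    by_cases hdc : d = c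
    · subst hdc
      have hs' : List.Pairwise (· ≤ ·) (d :: t') := hdt
      obtain ⟨j, rest, ht', hnm, hp⟩ := ih (List.pairwise_cons.mpr
        ⟨fun y hy => hcle y (List.mem_cons_of_mem _ hy), (List.pairwise_cons.mp hdt).2⟩)
      exact ⟨j + 1, rest, by rw [List.replicate_succ, List.cons_append, ht'], hnm, hp⟩
    · refine ⟨0, d :: t', rfl, ?_, hdt⟩
      have hcd : c < d := lt_of_le_of_ne (hcle d (by simp)) (fun h => hdc h.symm)
      intro hmem
      rcases List.mem_cons.mp hmem with h | h
      · exact hdc h.symm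
      · exact absurd (lt_of_lt_of_le hcd ((List.pairwise_cons.mp hdt).1 c h)) (lt_irrefl c)

-- the maximum multiplicity of any character of l
def pvMaxCnt (l : List Char) : Nat := (l.map (fun y => l.count y)).foldr max 0

lemma foldr_max_replicate (v a : Nat) : ∀ m, (List.replicate m v).foldr max a
    = if m = 0 then a else max v a := by
  intro m
  induction m with
  | zero => simp
  | succ m ih =>
    rw [List.replicate_succ, List.foldr_cons, ih]
    rcases Nat.eq_zero_or_pos m with h | h
    · subst h; simp
    · have : m ≠ 0 := by omega
      simp [this]

lemma le_foldr_max {a : Nat} : ∀ {xs : List Nat}, a ∈ xs → a ≤ xs.foldr max 0 := by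
  intro xs
  induction xs with
  | nil => intro h; exact absurd h (List.not_mem_nil)
  | cons x t ih =>
    intro h
    rcases List.mem_cons.mp h with h | h
    · subst h; exact le_max_left _ _
    · exact le_trans (ih h) (le_max_right _ _)

lemma foldr_max_le {B : Nat} : ∀ {xs : List Nat}, (∀ a ∈ xs, a ≤ B) → xs.foldr max 0 ≤ B := by
  intro xs
  induction xs with
  | nil => intro _; exact Nat.zero_le _
  | cons x t ih =>
    intro h
    exact max_le (h x (by simp)) (ih fun a ha => h a (List.mem_cons_of_mem _ ha))

lemma maxcnt_decomp (c : Char) (j : Nat) (rest : List Char) (hc : c ∉ rest) :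
    pvMaxCnt (List.replicate (j + 1) c ++ rest) = max (j + 1) (pvMaxCnt rest) := by
  have hcnt0 : rest.count c = 0 := List.count_eq_zero.mpr hc
  have hcc : (List.replicate (j + 1) c ++ rest).count c = j + 1 := by
    simp [List.count_append, hcnt0]
  have hcy : ∀ y ∈ rest, (List.replicate (j + 1) c ++ rest).count y = rest.count y := by
    intro y hy
    have hyc : y ≠ c := fun h => hc (h ▸ hy)
    simp [List.count_append, List.count_replicate, Ne.symm hyc]
  have hmap : (List.replicate (j + 1) c ++ rest).map
        (fun y => (List.replicate (j + 1) c ++ rest).count y)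
      = List.replicate (j + 1) (j + 1) ++ rest.map (fun y => rest.count y) := by
    rw [List.map_append, List.map_replicate, hcc]
    congr 1
    exact List.map_congr_left hcy
  unfold pvMaxCnt
  rw [hmap, List.foldr_append, foldr_max_replicate]
  simp

-- the sorted-column scan computes the maximum multiplicity
lemma scan_sorted_best : ∀ (N : Nat) (l : List Char), l.length ≤ N →
    List.Pairwise (· ≤ ·) l → ∀ b : Int, 0 ≤ b →
    (l.foldl pvScanStep (b, 0, none)).1 = max b (pvMaxCnt l) := by
  intro N
  induction N with
  | zero =>
    intro l hl _ b hb
    have : l = [] := List.length_eq_zero_iff.mp (Nat.le_zero.mp hl)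
    subst this
    simp [pvMaxCnt, max_eq_left hb]
  | succ N ih =>
    intro l hl hs b hb
    match l with
    | [] => simp [pvMaxCnt, max_eq_left hb]
    | c :: t =>
      obtain ⟨j, rest, ht, hnm, hp⟩ := sorted_head_decomp c t hs
      subst ht
      have hstep : pvScanStep (b, 0, none) c = (max b 1, 1, some c) := by
        have hbeq : (some c == (none : Option Char)) = false := by simp
        simp only [pvScanStep, hbeq, Bool.false_eq_true, if_false]
        rw [ite_gt_eq_max]
      rw [List.foldl_cons, hstep, List.foldl_append, scan_replicate]
      have hB : (if j = 0 then max b 1 else max (max b 1) (1 + (j : Int)))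
          = max b (1 + (j : Int)) := by
        rcases Nat.eq_zero_or_pos j with h | h
        · subst h; simp
        · have hj0 : j ≠ 0 := by omega
          simp only [hj0, if_false]
          rw [max_assoc, max_eq_right (by omega : (1 : Int) ≤ 1 + j)]
      rw [hB]
      have hLcnt : pvMaxCnt (c :: (List.replicate j c ++ rest)) = max (j + 1) (pvMaxCnt rest) := by
        have h1 : c :: (List.replicate j c ++ rest) = List.replicate (j + 1) c ++ rest := by
          rw [List.replicate_succ, List.cons_append]
        rw [h1]; exact maxcnt_decomp c j rest hnm
      have hcast : (1 : Int) + (j : Int) = ((j + 1 : Nat) : Int) := by push_cast; ring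
      cases rest with
      | nil =>
        simp only [List.foldl_nil]
        rw [hLcnt]
        have : pvMaxCnt ([] : List Char) = 0 := rfl
        rw [this, Nat.max_eq_left (Nat.zero_le _), ← hcast]
      | cons h t2 =>
        have hhc : h ≠ c := fun he => hnm (he ▸ List.mem_cons_self)
        rw [scan_reset _ _ c h t2 hhc]
        have hlen : (h :: t2).length ≤ N := by
          have hL : (c :: (List.replicate j c ++ h :: t2)).length
              = 1 + j + (h :: t2).length := by
            simp [List.length_append]; omega
          omega
        rw [ih (h :: t2) hlen hp _ (le_trans hb (le_max_left _ _))]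
        rw [hLcnt, Nat.cast_max, hcast, max_assoc]

-- mismatches + matches = column length (with the decide-normalised predicate)
lemma countP_ne_add_count (col : List Char) (mc : Char) :
    col.countP (fun c => !decide (c = mc)) + col.count mc = col.length := by
  induction col with
  | nil => rfl
  | cons c t ih =>
    by_cases h : c = mc <;> simp [h] <;> omega

-- A's per-column mismatch count is length − maximum multiplicity
lemma colA_eq (col : List Char) (hne : col ≠ []) :
    (col.countP (fun c =>
        decide (c ≠ (PySem.List.max? (PySem.Set.ofList col) (fun c => col.count c)).getD ' ')) : Int)
      = (col.length : Int) - (pvMaxCnt col : Int) := by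
  have hset_nil : PySem.Set.ofList col = [] → col = [] := by
    intro h
    cases col with
    | nil => rfl
    | cons c t =>
      have hc : c ∈ PySem.Set.ofList (c :: t) := (PySem.Set.mem_ofList _ c).mpr List.mem_cons_self
      rw [h] at hc
      exact absurd hc List.not_mem_nil
  obtain ⟨mc, hmc⟩ : ∃ mc, PySem.List.max? (PySem.Set.ofList col) (fun c => col.count c) = some mc := by
    rcases h : PySem.List.max? (PySem.Set.ofList col) (fun c => col.count c) with _ | mc
    · rw [PySem.List.max?_eq_none_iff] at h
      exact absurd (hset_nil h) hne
    · exact ⟨mc, rfl⟩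
  have hmcmem : mc ∈ col := (PySem.Set.mem_ofList _ _).mp (PySem.List.max?_mem hmc)
  have hmax : ∀ y ∈ col, col.count y ≤ col.count mc := fun y hy =>
    PySem.List.max?_isMax hmc y ((PySem.Set.mem_ofList _ _).mpr hy)
  have hcnt : pvMaxCnt col = col.count mc := by
    apply le_antisymm
    · exact foldr_max_le (fun a ha => by
        obtain ⟨y, hy, rfl⟩ := List.mem_map.mp ha
        exact hmax y hy)
    · exact le_foldr_max (List.mem_map.mpr ⟨mc, hmcmem, rfl⟩)
  have hN := countP_ne_add_count col mc
  rw [hmc]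
  simp only [Option.getD_some, ne_eq, decide_not, hcnt]
  omega

-- B's per-column kept count equals the column's maximum multiplicity
lemma colB_eq (col : List Char) :
    ((PySem.List.sorted col (fun c => c) false).foldl pvScanStep (0, 0, none)).1
      = ((PySem.List.sorted col (fun c => c) false |> pvMaxCnt) : Int) := by
  have hpw : List.Pairwise (· ≤ ·) (PySem.List.sorted col (fun c => c) false) :=
    PySem.List.sorted_pairwise col (fun c => c)
  rw [scan_sorted_best (PySem.List.sorted col (fun c => c) false).length _ le_rfl hpw 0 le_rfl]
  exact max_eq_right (by positivity)

-- maximum multiplicity is invariant under sorting (a permutation)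
lemma maxcnt_sorted (col : List Char) :
    pvMaxCnt (PySem.List.sorted col (fun c => c) false) = pvMaxCnt col := by
  have hperm : (PySem.List.sorted col (fun c => c) false).Perm col :=
    PySem.List.sorted_perm col (fun c => c) false
  apply le_antisymm
  · apply foldr_max_le
    intro a ha
    obtain ⟨y, hy, rfl⟩ := List.mem_map.mp ha
    rw [hperm.count_eq]
    exact le_foldr_max (List.mem_map.mpr ⟨y, hperm.mem_iff.mp hy, rfl⟩)
  · apply foldr_max_le
    intro a ha
    obtain ⟨y, hy, rfl⟩ := List.mem_map.mp ha
    rw [← hperm.count_eq]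
    exact le_foldr_max (List.mem_map.mpr ⟨y, hperm.mem_iff.mpr hy, rfl⟩)

-- Σ (n − f i) over a list = length·n − Σ f i
lemma sum_sub_map (f : Nat → Int) (n : Int) : ∀ (l : List Nat),
    (l.map (fun i => n - f i)).sum = (l.length : Int) * n - (l.map f).sum := by
  intro l
  induction l with
  | nil => simp
  | cons x t ih =>
    simp only [List.map_cons, List.sum_cons, ih, List.length_cons]
    push_cast; ring

-- ===== VERDICT (by name: the statement is the Claim_ definition above) =====
theorem score_motifs_with_hamming_distance_spec : Claim_equal_score_motifs_with_hamming_distance := by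
  intro motifs _ hpre
  unfold Spec_score_motifs_with_hamming_distance
  obtain ⟨hne, -⟩ := hpre
  match motifs with
  | [] => exact absurd rfl hne
  | m0 :: rest =>
    simp only [score_motifs_with_hamming_distance, score_motifs_with_hamming_distance_alt]
    set ms := m0 :: rest with hms
    set k := m0.toList.length with hk
    have hcol_ne : ∀ i : Nat, ms.map (fun m => m.toList.getD i ' ') ≠ [] := by
      intro i h
      rw [List.map_eq_nil_iff] at h
      exact List.cons_ne_nil _ _ h
    -- A's foldl as a sum
    rw [PySem.List.foldl_add (g := fun i =>
      (((ms.map (fun m => m.toList.getD i ' ')).countP (fun c => decide (c ≠ (PySem.List.max? (PySem.Set.ofList (ms.map (fun m => m.toList.getD i ' '))) (fun c => (ms.map (fun m => m.toList.getD i ' ')).count c)).getD ' '))) : Int))]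
    -- B's foldl as a sum
    rw [PySem.List.foldl_add (g := fun i =>
      ((PySem.List.sorted (ms.map (fun m => m.toList.getD i ' ')) (fun c => c) false).foldl
        pvScanStep (0, 0, none)).1)]
    simp only [zero_add]
    -- rewrite each A term as n − maxcnt and each B term as maxcnt
    have hAterm : ∀ i ∈ List.range k,
        (((ms.map (fun m => m.toList.getD i ' ')).countP (fun c => decide (c ≠ (PySem.List.max? (PySem.Set.ofList (ms.map (fun m => m.toList.getD i ' '))) (fun c => (ms.map (fun m => m.toList.getD i ' ')).count c)).getD ' '))) : Int)
        = (ms.length : Int) - (pvMaxCnt (ms.map (fun m => m.toList.getD i ' ')) : Int) := by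
      intro i _
      rw [colA_eq _ (hcol_ne i)]
      simp
    have hBterm : ∀ i ∈ List.range k,
        ((PySem.List.sorted (ms.map (fun m => m.toList.getD i ' ')) (fun c => c) false).foldl
          pvScanStep (0, 0, none)).1
        = (pvMaxCnt (ms.map (fun m => m.toList.getD i ' ')) : Int) := by
      intro i _
      rw [colB_eq _]
      simp [maxcnt_sorted]
    rw [List.map_congr_left hAterm, List.map_congr_left hBterm]
    rw [sum_sub_map (fun i => (pvMaxCnt (ms.map (fun m => m.toList.getD i ' ')) : Int)) _ (List.range k)]
    simp [mul_comm]
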